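-- pv_equiv track=rewrite | github.com/ThenTech/BDA-Assignments | Plagiarism/Resources/submissions/submissions/2198993.py | is_palindrome_sentence
-- ===== SOURCE A (Python) =====
-- import string
--
-- def removepunctuation(sentance):
-- 	returnvalue = ""
-- 	for char in sentance:
-- 		if char not in (string.punctuation):
-- 			returnvalue += char
-- 	splitvalue = returnvalue.split()
-- 	returnvalue = ""
-- 	for word in splitvalue:
-- 		returnvalue+= word
-- 	return returnvalue
--
-- def is_palindrome_sentence(sentence):
-- 	sentence = removepunctuation(sentence)
-- 	sentence = sentence.lower()
-- 	ispalindrome = True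
-- 	for i in range(len(sentence)):
-- 		if sentence[i] != sentence[len(sentence)-1-i]:
-- 			ispalindrome = False
-- 	return ispalindrome
-- ===== SOURCE B (Python) =====
-- import string
--
-- def is_palindrome_sentence(sentence):
--     skip = set(string.punctuation)
--     i, j = 0, len(sentence) - 1
--     while i < j:
--         if sentence[i] in skip or sentence[i].isspace():
--             i += 1
--         elif sentence[j] in skip or sentence[j].isspace():
--             j -= 1
--         elif sentence[i].lower() != sentence[j].lower():
--             return False
--         else:
--             i += 1
--             j -= 1
--     return True
-- ===== Notes on version B (the rewrite author's own statement) =====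
-- stated objective: faster
-- what changed: Two-pointer in-place scan over the raw string (skipping punctuation/whitespace from both ends, comparing lowercased characters, early-exit on first mismatch) replaces A's build-cleaned-string passes and exhaustive pairwise index loop; no cleaned string is ever built.
import Mathlib
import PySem

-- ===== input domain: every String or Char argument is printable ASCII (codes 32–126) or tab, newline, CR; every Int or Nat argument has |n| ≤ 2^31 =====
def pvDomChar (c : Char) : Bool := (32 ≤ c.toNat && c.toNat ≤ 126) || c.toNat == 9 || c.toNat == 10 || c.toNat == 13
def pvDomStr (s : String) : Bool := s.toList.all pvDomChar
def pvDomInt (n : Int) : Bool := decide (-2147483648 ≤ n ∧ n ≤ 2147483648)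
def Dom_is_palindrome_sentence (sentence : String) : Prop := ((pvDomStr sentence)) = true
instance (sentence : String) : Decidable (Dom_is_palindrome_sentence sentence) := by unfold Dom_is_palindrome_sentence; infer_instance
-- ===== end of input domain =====

-- B replaces A's build-a-cleaned-string passes and exhaustive pairwise index loop by a
-- two-pointer in-place scan over the raw string that skips punctuation/whitespace from
-- both ends and early-exits on the first mismatch; no cleaned string is built (measured faster in a timing run).

-- string.punctuation
def pvPunct : List Char := "!\"#$%&'()*+,-./:;<=>?@[\\]^_`{|}~".toList

-- ===== PORT A =====
-- helper removepunctuation: filter out punctuation char by char, then split() and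
-- re-join the words with a loop (split() = PySem.Chars.split₀).
def pvRemovePunct (s : List Char) : List Char :=
  let returnvalue := s.foldl (fun acc c => if pvPunct.contains c then acc else acc ++ [c]) []
  let splitvalue := PySem.Chars.split₀ returnvalue
  splitvalue.foldl (fun acc w => acc ++ w) []

def is_palindrome_sentence (sentence : String) : Bool :=
  let s := PySem.Chars.lower (pvRemovePunct sentence.toList)
  let n : Int := (s.length : Int)
  (PySem.List.pyRange 0 n 1).foldl
    (fun ispalindrome i =>
      if PySem.List.pyGet? s i ≠ PySem.List.pyGet? s (n - 1 - i) then false else ispalindrome)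
    true

-- ===== PORT B =====
-- skip = set(string.punctuation); a character is skipped iff it is punctuation or whitespace
def pvSkip (c : Char) : Bool := pvPunct.contains c || PySem.Chars.isspace c

-- the while loop: i walks up, j walks down; indices stay in range while i < j,
-- so the `none` arms of pyGet? are unreachable (totality guards only).
def pvGo (s : List Char) : Nat → Int → Int → Bool
  | 0, _, _ => true     -- fuel exhausted: unreachable, fuel = len(s) always suffices
  | fuel + 1, i, j =>
    if i < j then
      match PySem.List.pyGet? s i with
      | none => true   -- unreachable: 0 ≤ i < j ≤ len-1
      | some ci =>
        if pvSkip ci then pvGo s fuel (i + 1) j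
        else
          match PySem.List.pyGet? s j with
          | none => true   -- unreachable
          | some cj =>
            if pvSkip cj then pvGo s fuel i (j - 1)
            else if PySem.Chars.lowerChar ci ≠ PySem.Chars.lowerChar cj then false
            else pvGo s fuel (i + 1) (j - 1)
    else true

def is_palindrome_sentence_alt (sentence : String) : Bool :=
  pvGo sentence.toList sentence.toList.length 0 ((sentence.toList.length : Int) - 1)

-- ===== PRECONDITION & SPEC =====
def Spec_is_palindrome_sentence (sentence : String) (out : Bool) : Prop := out = is_palindrome_sentence_alt sentence
instance (sentence : String) (out : Bool) : Decidable (Spec_is_palindrome_sentence sentence out) := by unfold Spec_is_palindrome_sentence; infer_instance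

-- ===== CLAIM (what is proved, stated in full; the proofs are below) =====
def Claim_equal_is_palindrome_sentence : Prop := ∀ (sentence : String), Dom_is_palindrome_sentence sentence → Spec_is_palindrome_sentence sentence (is_palindrome_sentence sentence)

-- ===== LEMMAS AND PROOFS =====

-- the cleaned string both programs are (implicitly) about
def pvClean (s : List Char) : List Char :=
  (s.filter (fun c => !pvSkip c)).map PySem.Chars.lowerChar

-- A's first loop is a filter.
theorem pv_filter_loop (s : List Char) :
    s.foldl (fun acc c => if pvPunct.contains c then acc else acc ++ [c]) [] =
      s.filter (fun c => !pvPunct.contains c) := by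
  have h : (fun (acc : List Char) c => if pvPunct.contains c then acc else acc ++ [c]) =
      (fun acc c => if (!pvPunct.contains c) = true then acc ++ [id c] else acc) := by
    funext acc c; cases hc : pvPunct.contains c <;> simp
  rw [h, PySem.List.foldl_append_if]
  simp

-- joining everything split₀ produces is filtering out the whitespace
theorem pv_split₀_go_flatten :
    ∀ (rest cur : List Char) (acc : List (List Char)),
      (PySem.Chars.split₀.go rest cur acc).flatten =
        acc.reverse.flatten ++ cur.reverse ++ rest.filter (fun c => !PySem.Chars.isspace c) := by
  intro rest
  induction rest with
  | nil =>
      intro cur acc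
      by_cases h : cur = [] <;> simp [PySem.Chars.split₀.go, h]
  | cons c rest ih =>
      intro cur acc
      by_cases hs : PySem.Chars.isspace c = true
      · by_cases h : cur = [] <;>
          simp [PySem.Chars.split₀.go, hs, h, ih]
      · simp only [Bool.not_eq_true] at hs
        simp [PySem.Chars.split₀.go, hs, ih]

theorem pv_foldl_append_flatten (L : List (List Char)) (init : List Char) :
    L.foldl (fun acc w => acc ++ w) init = init ++ L.flatten := by
  induction L generalizing init with
  | nil => simp
  | cons w L ih => simp [List.foldl_cons, ih]

theorem pv_clean_eq (s : List Char) :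
    PySem.Chars.lower (pvRemovePunct s) = pvClean s := by
  unfold pvRemovePunct pvClean
  rw [pv_filter_loop, pv_foldl_append_flatten, PySem.Chars.split₀,
    pv_split₀_go_flatten]
  simp [PySem.Chars.lower, List.filter_filter]
  congr 1
  apply List.filter_congr
  intro c _
  simp [pvSkip]
  cases h1 : pvPunct.contains c <;> cases h2 : PySem.Chars.isspace c <;> simp

-- the flag-accumulating loop
theorem pv_flag_foldl (p : Int → Prop) [DecidablePred p] (l : List Int) (b : Bool) :
    l.foldl (fun isp i => if p i then false else isp) b
      = (b && l.all (fun i => !(decide (p i)))) := by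
  induction l generalizing b with
  | nil => simp
  | cons x l ih =>
      simp only [List.foldl_cons, List.all_cons]
      by_cases hx : p x
      · rw [if_pos hx, ih]; simp [hx]
      · rw [if_neg hx, ih]; simp [hx]

-- pairwise mirror equality over the index range ↔ the list equals its reverse
theorem pv_pal_iff (l : List Char) :
    (∀ i : Int, 0 ≤ i → i < (l.length : Int) →
        PySem.List.pyGet? l i = PySem.List.pyGet? l ((l.length : Int) - 1 - i)) ↔
      l = l.reverse := by
  constructor
  · intro h
    apply List.ext_getElem (by simp)
    intro i h1 h2
    have hi := h (i : Int) (by positivity) (by exact_mod_cast h1)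
    have hcast : ((l.length : Int) - 1 - (i : Int)) = ((l.length - 1 - i : Nat) : Int) := by
      omega
    rw [hcast, PySem.List.pyGet?_natCast, PySem.List.pyGet?_natCast] at hi
    have hb : l.length - 1 - i < l.length := by omega
    rw [List.getElem?_eq_getElem h1, List.getElem?_eq_getElem hb] at hi
    rw [List.getElem_reverse]
    exact Option.some.inj hi
  · intro h i h0 hn
    obtain ⟨k, rfl⟩ : ∃ k : Nat, i = (k : Int) := ⟨i.toNat, by omega⟩
    have hkl : k < l.length := by omega
    have hcast : ((l.length : Int) - 1 - (k : Int)) = ((l.length - 1 - k : Nat) : Int) := by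
      omega
    rw [hcast, PySem.List.pyGet?_natCast, PySem.List.pyGet?_natCast]
    conv_lhs => rw [h]
    rw [List.getElem?_reverse hkl]

-- A computes: the cleaned string equals its reverse.
theorem pv_A_eq (sentence : String) :
    is_palindrome_sentence sentence =
      decide (pvClean sentence.toList = (pvClean sentence.toList).reverse) := by
  unfold is_palindrome_sentence
  simp only []
  rw [pv_clean_eq]
  set l := pvClean sentence.toList with hl
  rw [pv_flag_foldl]
  rw [Bool.eq_iff_iff]
  simp only [Bool.true_and, List.all_eq_true, decide_eq_true_eq]
  rw [← pv_pal_iff]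
  constructor
  · intro h i h0 hn
    have := h i (by rw [PySem.List.mem_pyRange_one]; exact ⟨h0, hn⟩)
    simpa using this
  · intro h i hi
    rw [PySem.List.mem_pyRange_one] at hi
    simpa using h i hi.1 hi.2

-- the segment s[i..j] (inclusive) the two-pointer loop still has to examine
def pvSeg (s : List Char) (i j : Nat) : List Char := (s.drop i).take (j + 1 - i)

theorem pvSeg_cons (s : List Char) (i j : Nat) (hij : i ≤ j) (hj : j < s.length) :
    pvSeg s i j = s[i]'(by omega) :: pvSeg s (i + 1) j := by
  unfold pvSeg
  rw [List.drop_eq_getElem_cons (by omega)]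
  have : j + 1 - i = (j + 1 - (i + 1)) + 1 := by omega
  rw [this, List.take_succ_cons]

theorem pvSeg_snoc (s : List Char) (i j : Nat) (hij : i ≤ j) (hj1 : 1 ≤ j) (hj : j < s.length) :
    pvSeg s i j = pvSeg s i (j - 1) ++ [s[j]'hj] := by
  unfold pvSeg
  have h1 : j + 1 - i = (j - i) + 1 := by omega
  rw [h1, List.take_add_one]
  have h2 : (s.drop i)[j - i]? = some (s[j]'hj) := by
    rw [List.getElem?_drop]
    have : i + (j - i) = j := by omega
    rw [this, List.getElem?_eq_getElem hj]
  rw [h2]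
  have h3 : (j - 1) + 1 - i = j - i := by omega
  rw [h3]
  rfl

-- snoc-palindrome decomposition
theorem pv_pal_snoc (a b : Char) (m : List Char) :
    (a :: (m ++ [b]) = (a :: (m ++ [b])).reverse) ↔ (a = b ∧ m = m.reverse) := by
  have hr : (a :: (m ++ [b])).reverse = b :: (m.reverse ++ [a]) := by simp
  rw [hr]
  constructor
  · intro h
    obtain ⟨h1, h2⟩ := List.cons.inj h
    refine ⟨h1, ?_⟩
    rcases List.append_inj' h2 (by simp) with ⟨hm, _⟩
    exact hm
  · rintro ⟨rfl, h2⟩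
    rw [← h2]

-- the two-pointer loop computes: the cleaned remaining segment equals its reverse
theorem pvGo_eq (s : List Char) : ∀ (fuel i j : Nat), j + 1 - i ≤ fuel → i ≤ j + 1 → j < s.length →
    pvGo s fuel (i : Int) (j : Int) =
      decide (pvClean (pvSeg s i j) = (pvClean (pvSeg s i j)).reverse) := by
  intro fuel
  induction fuel with
  | zero =>
      intro i j hf hij hj
      have : i = j + 1 := by omega
      subst this
      simp [pvGo, pvSeg, pvClean]
  | succ fuel ih =>
      intro i j hf hij hj
      rw [pvGo]
      by_cases hlt : (i : Int) < (j : Int)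
      · have hij' : i < j := by exact_mod_cast hlt
        rw [if_pos hlt]
        have hi : PySem.List.pyGet? s (i : Int) = some (s[i]'(by omega)) := by
          rw [PySem.List.pyGet?_natCast, List.getElem?_eq_getElem (by omega)]
        rw [hi]
        simp only []
        by_cases hski : pvSkip (s[i]'(by omega)) = true
        · rw [if_pos hski]
          have h1 : ((i : Int) + 1) = ((i + 1 : Nat) : Int) := by push_cast; ring
          rw [h1, ih (i+1) j (by omega) (by omega) hj]
          rw [pvSeg_cons s i j (by omega) hj]
          simp [pvClean, hski]
        · rw [if_neg hski]
          have hjv : PySem.List.pyGet? s (j : Int) = some (s[j]'hj) := by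
            rw [PySem.List.pyGet?_natCast, List.getElem?_eq_getElem hj]
          rw [hjv]
          simp only []
          by_cases hskj : pvSkip (s[j]'hj) = true
          · rw [if_pos hskj]
            have h1 : ((j : Int) - 1) = ((j - 1 : Nat) : Int) := by omega
            rw [h1, ih i (j-1) (by omega) (by omega) (by omega)]
            rw [pvSeg_snoc s i j (by omega) (by omega) hj]
            simp [pvClean, hskj]
          · rw [if_neg hskj]
            -- clean segment = lower s[i] :: mid ++ [lower s[j]]
            have hdec : pvClean (pvSeg s i j) =
                PySem.Chars.lowerChar (s[i]'(by omega)) ::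
                  (pvClean (pvSeg s (i+1) (j-1)) ++ [PySem.Chars.lowerChar (s[j]'hj)]) := by
              rw [pvSeg_cons s i j (by omega) hj, pvSeg_snoc s (i+1) j (by omega) (by omega) hj]
              simp [pvClean, hski, hskj]
            by_cases hne : PySem.Chars.lowerChar (s[i]'(by omega)) ≠ PySem.Chars.lowerChar (s[j]'hj)
            · rw [if_pos hne]
              rw [hdec]
              have : ¬ (PySem.Chars.lowerChar (s[i]'(by omega)) ::
                  (pvClean (pvSeg s (i+1) (j-1)) ++ [PySem.Chars.lowerChar (s[j]'hj)]) =
                  (PySem.Chars.lowerChar (s[i]'(by omega)) ::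
                  (pvClean (pvSeg s (i+1) (j-1)) ++ [PySem.Chars.lowerChar (s[j]'hj)])).reverse) := by
                rw [pv_pal_snoc]
                rintro ⟨h1, _⟩
                exact hne h1
              exact (decide_eq_false this).symm
            · rw [if_neg hne]
              rw [not_not] at hne
              have h1 : ((i : Int) + 1) = ((i + 1 : Nat) : Int) := by push_cast; ring
              have h2 : ((j : Int) - 1) = ((j - 1 : Nat) : Int) := by omega
              rw [h1, h2, ih (i+1) (j-1) (by omega) (by omega) (by omega)]
              rw [hdec]
              rw [Bool.eq_iff_iff]
              simp only [decide_eq_true_eq]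
              rw [pv_pal_snoc]
              constructor
              · intro h; exact ⟨hne, h⟩
              · intro h; exact h.2
      · rw [if_neg hlt]
        have : i = j ∨ i = j + 1 := by omega
        rcases this with h | h
        · subst h
          have : pvSeg s i i = [s[i]'(by omega)] := by
            unfold pvSeg
            have h1 : i + 1 - i = 1 := by omega
            rw [h1, List.take_one, List.head?_drop, List.getElem?_eq_getElem (by omega)]
            rfl
          rw [this]
          by_cases hk : pvSkip (s[i]'(by omega)) = true <;> simp [pvClean, hk]
        · subst h
          have : pvSeg s (j+1) j = [] := by simp [pvSeg]
          rw [this]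
          simp [pvClean]

-- ===== VERDICT (by name: the statement is the Claim_ definition above) =====
theorem is_palindrome_sentence_spec : Claim_equal_is_palindrome_sentence := by
  intro sentence _
  unfold Spec_is_palindrome_sentence is_palindrome_sentence_alt
  rw [pv_A_eq]
  rcases h : sentence.toList with _ | ⟨c, rest⟩
  · simp [pvGo, pvClean]
  · have hn : 1 ≤ (c :: rest).length := by simp
    have hcast : (((c :: rest).length : Int) - 1) = (((c :: rest).length - 1 : Nat) : Int) := by
      omega
    rw [show ((0:Int)) = ((0:Nat):Int) from rfl, hcast,
      pvGo_eq (c :: rest) ((c :: rest).length) 0 ((c :: rest).length - 1)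
        (by omega) (by omega) (by omega)]
    have hseg : pvSeg (c :: rest) 0 ((c :: rest).length - 1) = c :: rest := by
      unfold pvSeg
      have h1 : (c :: rest).length - 1 + 1 - 0 = (c :: rest).length := by omega
      rw [h1]
      simp
    rw [hseg]
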